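-- pv_equiv track=rewrite | github.com/madibabaiasl/NeuroCommitSSM | kinova_gen3_robot_implementation/T4_plant/plant_move_supervisor_metrics.py | _count_flaps
-- ===== SOURCE A (Python) =====
-- from typing import Optional, List, Tuple, Dict, Any, Callable
--
-- def _count_flaps(commit_states: List[str]) -> int:
--     if not commit_states:
--         return 0
--     flaps = 0
--     prev = commit_states[0]
--     for s in commit_states[1:]:
--         if s != prev:
--             flaps += 1
--             prev = s
--     return flaps
-- ===== SOURCE B (Python) =====
-- def _count_flaps(commit_states):
--     # Divide and conquer: transitions(l ++ r) = transitions(l) + transitions(r)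
--     # + (1 if the boundary pair differs), with lists of length < 2 having 0.
--     if len(commit_states) < 2:
--         return 0
--     m = len(commit_states) // 2
--     left = commit_states[:m]
--     right = commit_states[m:]
--     return (_count_flaps(left) + _count_flaps(right)
--             + (1 if left[-1] != right[0] else 0))
-- ===== Notes on version B (the rewrite author's own statement) =====
-- stated objective: alternative
-- what changed: Replaced A's single prev-tracking linear scan with a divide-and-conquer recursion: split the list in halves, count flaps in each half recursively, and add one if the two boundary elements differ.
import Mathlib
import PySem

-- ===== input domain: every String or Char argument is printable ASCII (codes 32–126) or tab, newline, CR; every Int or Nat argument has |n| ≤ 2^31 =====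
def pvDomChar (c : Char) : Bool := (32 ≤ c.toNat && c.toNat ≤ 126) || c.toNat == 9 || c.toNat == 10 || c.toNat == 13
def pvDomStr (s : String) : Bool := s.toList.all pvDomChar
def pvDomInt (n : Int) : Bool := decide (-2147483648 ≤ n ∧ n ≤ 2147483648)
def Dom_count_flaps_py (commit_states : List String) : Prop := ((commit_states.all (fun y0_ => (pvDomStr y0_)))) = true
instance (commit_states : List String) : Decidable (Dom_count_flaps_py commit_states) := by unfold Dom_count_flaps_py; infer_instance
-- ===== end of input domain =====

-- B replaces A's single prev-tracking scan by a divide-and-conquer recursion on halves (alternative decomposition; same result).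

-- ===== PORT A =====
-- literal port of A: early return on empty, then fold over the tail with state (flaps, prev)
def count_flaps_py (commit_states : List String) : Int :=
  match commit_states with
  | [] => 0
  | p :: rest =>
    (rest.foldl (fun (st : Int × String) s => if s ≠ st.2 then (st.1 + 1, s) else st) (0, p)).1

-- ===== PORT B =====
-- port of Source B: split at m = len/2 (take/drop is exact for 0 ≤ m ≤ len), recurse,
-- add 1 when the boundary elements (left[-1], right[0], both present since len ≥ 2) differ
def count_flaps_py_alt (commit_states : List String) : Int :=
  if commit_states.length < 2 then 0
  else
    let m := commit_states.length / 2
    let left := commit_states.take m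
    let right := commit_states.drop m
    count_flaps_py_alt left + count_flaps_py_alt right +
      (if left.getLast? ≠ right.head? then 1 else 0)
termination_by commit_states.length
decreasing_by
  · simp only [List.length_take]; omega
  · simp only [List.length_drop]; omega

-- ===== PRECONDITION & SPEC =====
def Spec_count_flaps_py (commit_states : List String) (out : Int) : Prop := out = count_flaps_py_alt commit_states
instance (commit_states : List String) (out : Int) : Decidable (Spec_count_flaps_py commit_states out) := by unfold Spec_count_flaps_py; infer_instance

-- ===== CLAIM =====
def Claim_equal_count_flaps_py : Prop := ∀ (commit_states : List String), Dom_count_flaps_py commit_states → Spec_count_flaps_py commit_states (count_flaps_py commit_states)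

-- ===== LEMMAS AND PROOFS =====

-- reference: number of adjacent unequal pairs, by structural recursion
def cTrans : List String → Int
  | [] => 0
  | [_] => 0
  | a :: b :: t => (if a = b then 0 else 1) + cTrans (b :: t)

lemma fold_eq_cTrans (rest : List String) : ∀ (p : String) (acc : Int),
    (rest.foldl (fun (st : Int × String) s => if s ≠ st.2 then (st.1 + 1, s) else st) (acc, p)).1
      = acc + cTrans (p :: rest) := by
  induction rest with
  | nil => intro p acc; simp [cTrans]
  | cons s t ih =>
    intro p acc
    rw [List.foldl_cons]
    by_cases h : s = p
    · subst h
      simpa [cTrans] using ih s acc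
    · simp only [ne_eq, h, not_false_eq_true, if_true]
      rw [ih s (acc + 1)]
      simp only [cTrans, if_neg (Ne.symm h)]
      ring

lemma cTrans_append : ∀ (l r : List String), l ≠ [] → r ≠ [] →
    cTrans (l ++ r) = cTrans l + cTrans r + (if l.getLast? ≠ r.head? then 1 else 0) := by
  intro l
  induction l with
  | nil => intro r h; exact absurd rfl h
  | cons a t ih =>
    intro r _ hr
    cases t with
    | nil =>
      cases r with
      | nil => exact absurd rfl hr
      | cons b u =>
        by_cases h : a = b <;> simp [cTrans, h] <;> ring
    | cons b u =>
      have := ih r (by simp) hr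
      simp only [List.cons_append] at *
      show cTrans (a :: b :: (u ++ r)) = _
      simp only [cTrans]
      rw [this]
      have hl : (a :: b :: u).getLast? = (b :: u).getLast? := by
        simp [List.getLast?_cons_cons]
      rw [hl]
      ring

lemma alt_eq_cTrans : ∀ (n : ℕ) (xs : List String), xs.length ≤ n →
    count_flaps_py_alt xs = cTrans xs := by
  intro n
  induction n with
  | zero =>
    intro xs h
    have : xs = [] := List.length_eq_zero_iff.mp (Nat.le_zero.mp h)
    subst this
    simp [count_flaps_py_alt, cTrans]
  | succ k ih =>
    intro xs h
    rw [count_flaps_py_alt]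
    by_cases hlt : xs.length < 2
    · interval_cases hx : xs.length
      · simp [List.length_eq_zero_iff.mp hx, cTrans]
      · obtain ⟨a, rfl⟩ := List.length_eq_one_iff.mp hx
        simp [cTrans]
    · simp only [if_neg hlt]
      have h2 : 2 ≤ xs.length := Nat.le_of_not_lt hlt
      have hm1 : 1 ≤ xs.length / 2 := by omega
      have hm2 : xs.length / 2 < xs.length := by omega
      have htake : (xs.take (xs.length / 2)).length = xs.length / 2 := by
        simp; omega
      have hdrop : (xs.drop (xs.length / 2)).length = xs.length - xs.length / 2 := by simp
      have hlne : xs.take (xs.length / 2) ≠ [] := by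
        intro hc; rw [← List.length_eq_zero_iff] at hc; omega
      have hrne : xs.drop (xs.length / 2) ≠ [] := by
        intro hc; rw [← List.length_eq_zero_iff] at hc; omega
      rw [ih _ (by omega), ih _ (by omega)]
      have := cTrans_append (xs.take (xs.length / 2)) (xs.drop (xs.length / 2)) hlne hrne
      rw [List.take_append_drop] at this
      rw [this]

-- ===== VERDICT =====
theorem count_flaps_py_spec : Claim_equal_count_flaps_py := by
  intro l _
  unfold Spec_count_flaps_py count_flaps_py
  rw [alt_eq_cTrans l.length l le_rfl]
  match l with
  | [] => rfl
  | p :: rest => simpa using fold_eq_cTrans rest p 0
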